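-- pv_equiv track=rewrite | github.com/cosmoren/luoyang_demo | SPMF_preprocessing/skippd/rename_pacific_to_utc.py | site_matches
-- ===== SOURCE A (Python) =====
-- def site_matches(dst_rel: tuple[str, ...], filters: list[str] | None) -> bool:
--     if not filters:
--         return True
--     rel = "/".join(dst_rel)
--     for raw in filters:
--         fn = raw.strip().strip("/")
--         if not fn:
--             continue
--         if fn == rel or rel.endswith("/" + fn) or (dst_rel and dst_rel[-1] == fn):
--             return True
--         if "/" in fn and rel == fn:
--             return True
--     return False
-- ===== SOURCE B (Python) =====
-- def site_matches(dst_rel, filters):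
--     if not filters:
--         return True
--     rel = "/".join(dst_rel)
--     # index: suffix length -> start position of the segment-aligned suffix of that length
--     start_by_len = {}
--     for i, ch in enumerate(rel):
--         if ch == "/":
--             start_by_len[len(rel) - i - 1] = i + 1
--     last = dst_rel[-1] if dst_rel else None
--     for raw in filters:
--         fn = raw.strip().strip("/")
--         if not fn:
--             continue
--         if fn == rel or fn == last:
--             return True
--         k = start_by_len.get(len(fn))
--         if k is not None and rel[k:] == fn:
--             return True
--     return False
-- ===== Notes on version B (the rewrite author's own statement) =====
-- stated objective: alternative
-- what changed: Instead of testing each filter with string concatenation plus endswith (and a redundant '/' in fn clause), B precomputes a dict mapping suffix-length to the start position after each '/' in the joined path, and decides each filter by one dict lookup plus a slice comparison (plus direct checks against the whole path and the last segment).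
import Mathlib
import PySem

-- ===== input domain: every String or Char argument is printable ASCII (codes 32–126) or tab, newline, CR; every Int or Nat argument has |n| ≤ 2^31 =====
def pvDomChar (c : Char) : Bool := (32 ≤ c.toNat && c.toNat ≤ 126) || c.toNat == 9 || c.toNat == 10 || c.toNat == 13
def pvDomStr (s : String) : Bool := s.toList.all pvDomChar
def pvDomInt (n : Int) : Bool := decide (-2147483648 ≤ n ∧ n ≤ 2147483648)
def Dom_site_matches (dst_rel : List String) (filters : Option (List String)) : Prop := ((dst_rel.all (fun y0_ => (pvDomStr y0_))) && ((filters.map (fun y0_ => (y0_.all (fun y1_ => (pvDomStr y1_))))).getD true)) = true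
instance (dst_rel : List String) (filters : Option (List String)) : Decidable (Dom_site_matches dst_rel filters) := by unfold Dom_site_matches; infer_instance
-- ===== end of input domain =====

-- B precomputes a dict mapping suffix length to the start position after each '/' of the
-- joined path, then decides each filter by one lookup plus a slice comparison instead of
-- concatenation + endswith scans (objective: alternative decomposition, same cost).

-- ===== PORT A =====
-- fn = raw.strip().strip("/")
def pvStripFn (raw : String) : List Char :=
  PySem.Chars.stripChars (PySem.Chars.strip raw.toList) ['/']

-- the 'for raw in filters' loop of A
def pvLoopA (dst_rel : List String) (rel : List Char) : List String → Bool
  | [] => false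
  | raw :: rest =>
    let fn := pvStripFn raw
    if fn = [] then pvLoopA dst_rel rel rest
    else if decide (fn = rel) || PySem.Chars.endswith rel ('/' :: fn)
        || (!dst_rel.isEmpty && (PySem.List.pyGet? (dst_rel.map String.toList) (-1) == some fn)) then true
    else if PySem.Chars.isIn ['/'] fn && decide (rel = fn) then true
    else pvLoopA dst_rel rel rest

def site_matches (dst_rel : List String) (filters : Option (List String)) : Bool :=
  match filters with
  | none => true
  | some fs =>
    if fs.isEmpty then true
    else pvLoopA dst_rel (PySem.Chars.join ['/'] (dst_rel.map String.toList)) fs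

-- ===== PORT B =====
-- start_by_len: suffix length -> start position of the segment-aligned suffix of that length
def pvIndexB (rel : List Char) : PySem.Dict Int Int :=
  (PySem.List.enumerate rel 0).foldl
    (fun d p => if p.2 = '/' then PySem.Dict.insert d ((rel.length : Int) - p.1 - 1) (p.1 + 1) else d)
    PySem.Dict.empty

def site_matches_alt (dst_rel : List String) (filters : Option (List String)) : Bool :=
  match filters with
  | none => true
  | some fs =>
    if fs.isEmpty then true
    else
      let rel := PySem.Chars.join ['/'] (dst_rel.map String.toList)
      let idx := pvIndexB rel
      let lastSeg : Option (List Char) :=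
        if dst_rel.isEmpty then none
        else some ((PySem.List.pyGet? (dst_rel.map String.toList) (-1)).getD [])
      fs.any (fun raw =>
        let fn := pvStripFn raw
        !fn.isEmpty &&
          (decide (fn = rel) || (some fn == lastSeg) ||
            (match PySem.Dict.get? idx (fn.length : Int) with
             | none => false
             | some k => decide (PySem.List.slice rel (some k) = fn))))

-- ===== PRECONDITION & SPEC =====
def Spec_site_matches (dst_rel : List String) (filters : Option (List String)) (out : Bool) : Prop := out = site_matches_alt dst_rel filters
instance (dst_rel : List String) (filters : Option (List String)) (out : Bool) : Decidable (Spec_site_matches dst_rel filters out) := by unfold Spec_site_matches; infer_instance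

-- ===== CLAIM (what is proved, stated in full; the proofs are below) =====
def Claim_equal_site_matches : Prop := ∀ (dst_rel : List String) (filters : Option (List String)), Dom_site_matches dst_rel filters → Spec_site_matches dst_rel filters (site_matches dst_rel filters)

-- ===== LEMMAS AND PROOFS =====

theorem pv_endswith_slash (rel fn : List Char) :
    PySem.Chars.endswith rel ('/' :: fn) = true ↔
      ∃ k, ∃ _ : k < rel.length, rel[k] = '/' ∧ fn = rel.drop (k + 1) := by
  rw [PySem.Chars.endswith_iff]
  constructor
  · rintro ⟨p, hp⟩
    refine ⟨p.length, ?_, ?_, ?_⟩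
    · subst hp; simp
    · have hdp : rel.drop p.length = '/' :: fn := by subst hp; simp
      have h2 : rel[p.length]'(by subst hp; simp) = (rel.drop p.length)[0]'(by simp [hdp]) := by
        simp [List.getElem_drop]
      rw [h2]; simp [hdp]
    · have hdp : rel.drop p.length = '/' :: fn := by subst hp; simp
      have := congrArg (List.drop 1) hdp
      simpa [List.drop_drop, Nat.add_comm] using this.symm
  · rintro ⟨k, hk, hc, hd⟩
    refine ⟨rel.take k, ?_⟩
    conv_rhs => rw [← List.take_append_drop k rel]
    rw [List.drop_eq_getElem_cons hk, hc, ← hd]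

theorem pv_pyGet_last {α : Type} (l : List α) (h : l ≠ []) :
    PySem.List.pyGet? l (-1) = some (l.getLast h) := by
  have hl : 0 < l.length := List.length_pos_iff.mpr h
  have h2 : -(l.length : Int) ≤ -1 := by omega
  simp only [PySem.List.pyGet?, PySem.List.pyIdx?]
  rw [if_neg (by norm_num), if_pos h2]
  norm_num
  rw [List.getElem?_eq_getElem (by omega)]
  simp [List.getLast_eq_getElem]

-- soundness of a guarded fold of inserts: every binding comes from an element or from d
theorem pv_get_foldl_insert {β : Type} (l : List β) (P : β → Prop) [DecidablePred P]
    (key val : β → Int) (d : PySem.Dict Int Int) (K v : Int)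
    (h : PySem.Dict.get? (l.foldl (fun d b => if P b then PySem.Dict.insert d (key b) (val b) else d) d) K = some v) :
    (∃ b ∈ l, P b ∧ key b = K ∧ val b = v) ∨ PySem.Dict.get? d K = some v := by
  induction l generalizing d with
  | nil => exact Or.inr h
  | cons b rest ih =>
    rw [List.foldl_cons] at h
    rcases ih _ h with h1 | h1
    · obtain ⟨b', hb', h'⟩ := h1; exact Or.inl ⟨b', List.mem_cons_of_mem _ hb', h'⟩
    · by_cases hP : P b
      · rw [if_pos hP] at h1
        by_cases hK : K = key b
        · subst hK
          rw [PySem.Dict.get?_insert_self] at h1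
          exact Or.inl ⟨b, List.mem_cons_self, hP, rfl, (Option.some.injEq _ _).mp h1⟩
        · rw [PySem.Dict.get?_insert_of_ne _ _ hK] at h1
          exact Or.inr h1
      · rw [if_neg hP] at h1; exact Or.inr h1

-- a binding survives the fold when every later insert with the same key carries the same value
theorem pv_get_foldl_preserve {β : Type} (l : List β) (P : β → Prop) [DecidablePred P]
    (key val : β → Int) (d : PySem.Dict Int Int) (K v : Int)
    (hd : PySem.Dict.get? d K = some v)
    (huniq : ∀ b ∈ l, P b → key b = K → val b = v) :
    PySem.Dict.get? (l.foldl (fun d b => if P b then PySem.Dict.insert d (key b) (val b) else d) d) K = some v := by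
  induction l generalizing d with
  | nil => exact hd
  | cons b rest ih =>
    rw [List.foldl_cons]
    refine ih _ ?_ (fun b' hb' => huniq b' (List.mem_cons_of_mem _ hb'))
    by_cases hP : P b
    · rw [if_pos hP]
      by_cases hK : K = key b
      · subst hK
        rw [PySem.Dict.get?_insert_self, huniq b List.mem_cons_self hP rfl]
      · rw [PySem.Dict.get?_insert_of_ne _ _ hK]; exact hd
    · rw [if_neg hP]; exact hd

theorem pv_get_foldl_insert_mem {β : Type} (l : List β) (P : β → Prop) [DecidablePred P]
    (key val : β → Int) (b0 : β) (hb0 : b0 ∈ l) (hP : P b0)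
    (huniq : ∀ b ∈ l, P b → key b = key b0 → val b = val b0) :
    PySem.Dict.get? (l.foldl (fun d b => if P b then PySem.Dict.insert d (key b) (val b) else d) PySem.Dict.empty) (key b0) = some (val b0) := by
  obtain ⟨l1, l2, rfl⟩ := List.append_of_mem hb0
  rw [List.foldl_append, List.foldl_cons, if_pos hP]
  exact pv_get_foldl_preserve _ _ _ _ _ _ _ (PySem.Dict.get?_insert_self _ _ _)
    (fun b hb hPb hk => huniq b (by simp [hb]) hPb hk)

theorem pv_endswith_iff_idx (rel fn : List Char) :
    PySem.Chars.endswith rel ('/' :: fn) = true ↔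
      ∃ k, PySem.Dict.get? (pvIndexB rel) (fn.length : Int) = some k ∧
        PySem.List.slice rel (some k) = fn := by
  have hslice : ∀ i : Nat, PySem.List.slice rel (some ((i : Int) + 1)) = rel.drop (i + 1) := by
    intro i
    have := PySem.List.slice_from rel (a := (i : Int) + 1) (by positivity)
    simpa using this
  rw [pv_endswith_slash]
  constructor
  · rintro ⟨i, hi, hc, rfl⟩
    refine ⟨(i : Int) + 1, ?_, hslice i⟩
    have hlen : ((rel.drop (i + 1)).length : Int) = (rel.length : Int) - (i : Int) - 1 := by
      simp [List.length_drop]; omega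
    rw [hlen]
    have := pv_get_foldl_insert_mem (PySem.List.enumerate rel 0) (fun p => p.2 = '/')
      (fun p => (rel.length : Int) - p.1 - 1) (fun p => p.1 + 1)
      ((i : Int), rel[i])
      (by rw [PySem.List.mem_enumerate_iff]; exact ⟨i, hi, by simp⟩)
      (by simpa using hc)
      ?_
    · simpa using this
    · rintro ⟨pi, pc⟩ hp hPb hk
      rw [PySem.List.mem_enumerate_iff] at hp
      obtain ⟨j, hj, hpe⟩ := hp
      simp only [Prod.mk.injEq] at hpe
      obtain ⟨h1, -⟩ := hpe
      simp only at hk ⊢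
      omega
  · rintro ⟨k, hget, hsl⟩
    unfold pvIndexB at hget
    rcases pv_get_foldl_insert _ _ _ _ _ _ _ hget with h | h
    · obtain ⟨⟨pi, pc⟩, hp, hPb, hk, hv⟩ := h
      rw [PySem.List.mem_enumerate_iff] at hp
      obtain ⟨j, hj, hpe⟩ := hp
      simp only [Prod.mk.injEq] at hpe
      obtain ⟨h1, h2⟩ := hpe
      refine ⟨j, hj, ?_, ?_⟩
      · simp only at hPb; rw [h2] at hPb; exact hPb
      · have hkj : k = (j : Int) + 1 := by simp only at hv hk; omega
        rw [hkj, hslice j] at hsl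
        exact hsl.symm
    · rw [PySem.Dict.get?_empty] at h; exact absurd h (by simp)

-- the per-filter condition of A equals the per-filter condition of B
theorem pv_cond_eq (dst_rel : List String) (rel fn : List Char) :
    (decide (fn = rel) || PySem.Chars.endswith rel ('/' :: fn)
      || (!dst_rel.isEmpty && (PySem.List.pyGet? (dst_rel.map String.toList) (-1) == some fn)))
    = (decide (fn = rel)
        || (some fn == (if dst_rel.isEmpty then none
              else some ((PySem.List.pyGet? (dst_rel.map String.toList) (-1)).getD [])))
        || (match PySem.Dict.get? (pvIndexB rel) (fn.length : Int) with
            | none => false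
            | some k => decide (PySem.List.slice rel (some k) = fn))) := by
  have hlast : (!dst_rel.isEmpty && (PySem.List.pyGet? (dst_rel.map String.toList) (-1) == some fn))
      = (some fn == (if dst_rel.isEmpty then none
          else some ((PySem.List.pyGet? (dst_rel.map String.toList) (-1)).getD []))) := by
    by_cases hne : dst_rel.isEmpty
    · simp [hne]
    · have hne' : dst_rel.map String.toList ≠ [] := by
        simpa [List.isEmpty_iff] using hne
      rw [pv_pyGet_last _ hne']
      simp [hne, BEq.comm]
  have hdict : PySem.Chars.endswith rel ('/' :: fn)
      = (match PySem.Dict.get? (pvIndexB rel) (fn.length : Int) with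
          | none => false
          | some k => decide (PySem.List.slice rel (some k) = fn)) := by
    rw [Bool.eq_iff_iff, pv_endswith_iff_idx]
    cases hg : PySem.Dict.get? (pvIndexB rel) (fn.length : Int) with
    | none => simp
    | some k => simp
  rw [hlast, hdict, Bool.or_assoc, Bool.or_assoc]
  exact congrArg (decide (fn = rel) || ·) (Bool.or_comm _ _)

theorem pv_loop_eq_any (dst_rel : List String) (rel : List Char) (fs : List String) :
    pvLoopA dst_rel rel fs =
      fs.any (fun raw =>
        !(pvStripFn raw).isEmpty &&
          (decide (pvStripFn raw = rel)
            || (some (pvStripFn raw) == (if dst_rel.isEmpty then none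
                  else some ((PySem.List.pyGet? (dst_rel.map String.toList) (-1)).getD [])))
            || (match PySem.Dict.get? (pvIndexB rel) ((pvStripFn raw).length : Int) with
                | none => false
                | some k => decide (PySem.List.slice rel (some k) = pvStripFn raw)))) := by
  induction fs with
  | nil => rfl
  | cons raw rest ih =>
    rw [List.any_cons, ← ih]
    show (if pvStripFn raw = [] then _ else _) = _
    by_cases hfn : pvStripFn raw = []
    · simp [hfn]
    · rw [if_neg hfn, ← pv_cond_eq dst_rel rel (pvStripFn raw)]
      have hE : (pvStripFn raw).isEmpty = false := by simpa [List.isEmpty_iff] using hfn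
      by_cases hc : (decide (pvStripFn raw = rel) || PySem.Chars.endswith rel ('/' :: pvStripFn raw)
          || (!dst_rel.isEmpty && (PySem.List.pyGet? (dst_rel.map String.toList) (-1) == some (pvStripFn raw)))) = true
      · simp [hc, hE]
      · rw [Bool.not_eq_true] at hc
        have hrel : decide (rel = pvStripFn raw) = false := by
          simp only [Bool.or_eq_false_iff, decide_eq_false_iff_not] at hc ⊢
          exact fun h => hc.1.1 h.symm
        simp [hc, hE, hrel]

-- ===== VERDICT (by name: the statement is the Claim_ definition above) =====
theorem site_matches_spec : Claim_equal_site_matches := by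
  intro dst_rel filters _
  unfold Spec_site_matches
  cases filters with
  | none => rfl
  | some fs =>
    simp only [site_matches, site_matches_alt]
    by_cases hfs : fs.isEmpty
    · rw [if_pos hfs, if_pos hfs]
    · rw [if_neg hfs, if_neg hfs]
      exact pv_loop_eq_any dst_rel _ fs
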